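-- pv_equiv track=rewrite | github.com/mayank-17/Practice-Programs | Python/TRACE.PY | get_diagnols
-- ===== SOURCE A (Python) =====
-- def get_diagnols(grid, bltr = False):
--     dim = len(grid)
--     assert dim == len(grid[0])
--     return_grid = [[] for total in range(2 * len(grid) - 1)]
--     for row in range(len(grid)):
--         for col in range(len(grid[row])):
--             if bltr:
--                 return_grid[row + col].append(grid[col][row])
--             else:
--                 return_grid[col - row + (dim - 1)].append(grid[row][col])
--     return return_grid
-- ===== SOURCE B (Python) =====
-- def get_diagnols(grid, bltr=False):
--     # Gather each diagonal bucket directly instead of scattering cells into buckets.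
--     dim = len(grid)
--     assert dim == len(grid[0])
--     if bltr:
--         return [[grid[d - r][r] for r in range(dim) if 0 <= d - r < dim]
--                 for d in range(2 * dim - 1)]
--     return [[grid[r][r + d - (dim - 1)] for r in range(dim) if 0 <= r + d - (dim - 1) < dim]
--             for d in range(2 * dim - 1)]
-- ===== Notes on version B (the rewrite author's own statement) =====
-- stated objective: alternative
-- what changed: B gathers each diagonal bucket directly with one comprehension per diagonal index (inverted traversal), instead of A's scatter of every cell into a pre-allocated bucket list.
-- outside the precondition, e.g. on get_diagnols([[1, 2], [3]], False): A returns [[3], [1], [2]], B raises IndexError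
import Mathlib
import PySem

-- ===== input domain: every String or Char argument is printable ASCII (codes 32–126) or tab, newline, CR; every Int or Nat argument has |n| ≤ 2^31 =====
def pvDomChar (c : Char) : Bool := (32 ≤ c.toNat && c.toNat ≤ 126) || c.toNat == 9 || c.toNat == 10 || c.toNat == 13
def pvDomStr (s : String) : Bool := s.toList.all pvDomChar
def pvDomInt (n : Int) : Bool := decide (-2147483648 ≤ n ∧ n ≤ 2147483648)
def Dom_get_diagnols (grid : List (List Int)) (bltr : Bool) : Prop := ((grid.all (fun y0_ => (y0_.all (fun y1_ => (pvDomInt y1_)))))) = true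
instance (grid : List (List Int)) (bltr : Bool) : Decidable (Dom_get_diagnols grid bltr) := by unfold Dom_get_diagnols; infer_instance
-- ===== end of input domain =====

-- B groups cells by gathering each diagonal bucket directly (one comprehension per diagonal index)
-- instead of A's scatter of every cell into a bucket list; equivalence is proved on square non-empty grids.

-- ===== PORT A =====
-- return_grid[i].append(v); i is never negative when A's loop runs (row < dim), and an
-- out-of-range i makes Python raise (outside Pre_), where this helper no-ops.
def pvAppendAt (ret : List (List Int)) (i : Int) (v : Int) : List (List Int) :=
  if i < 0 then ret else ret.modify i.toNat (fun b => b ++ [v])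

def get_diagnols (grid : List (List Int)) (bltr : Bool) : List (List Int) :=
  let dim : Int := grid.length
  let ret0 : List (List Int) := (PySem.List.pyRange 0 (2 * dim - 1) 1).map (fun _ => [])
  (PySem.List.pyRange 0 dim 1).foldl (fun ret row =>
    (PySem.List.pyRange 0 (((PySem.List.pyGet? grid row).getD []).length : Int) 1).foldl (fun ret col =>
      if bltr then
        pvAppendAt ret (row + col) ((PySem.List.pyGet? ((PySem.List.pyGet? grid col).getD []) row).getD 0)
      else
        pvAppendAt ret (col - row + (dim - 1)) ((PySem.List.pyGet? ((PySem.List.pyGet? grid row).getD []) col).getD 0)) ret) ret0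

-- ===== PORT B =====
def get_diagnols_alt (grid : List (List Int)) (bltr : Bool) : List (List Int) :=
  let dim : Int := grid.length
  (PySem.List.pyRange 0 (2 * dim - 1) 1).map (fun d =>
    if bltr then
      (PySem.List.pyRange 0 dim 1).filterMap (fun r =>
        if 0 ≤ d - r ∧ d - r < dim then
          some ((PySem.List.pyGet? ((PySem.List.pyGet? grid (d - r)).getD []) r).getD 0)
        else none)
    else
      (PySem.List.pyRange 0 dim 1).filterMap (fun r =>
        if 0 ≤ r + d - (dim - 1) ∧ r + d - (dim - 1) < dim then
          some ((PySem.List.pyGet? ((PySem.List.pyGet? grid r).getD []) (r + d - (dim - 1))).getD 0)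
        else none))

-- ===== PRECONDITION & SPEC =====
-- Pre_ excludes empty and non-square grids: on those A raises (IndexError/AssertionError) for most
-- shapes, and where a ragged grid slips past A's first-row assert, the buckets A returns are an
-- accident of its row-major scatter (B raises an IndexError there).
def Pre_get_diagnols (grid : List (List Int)) (bltr : Bool) : Prop :=
  grid ≠ [] ∧ ∀ row ∈ grid, row.length = grid.length
instance (grid : List (List Int)) (bltr : Bool) : Decidable (Pre_get_diagnols grid bltr) := by
  unfold Pre_get_diagnols; infer_instance

def pvWitness_get_diagnols : List (List Int) × Bool := ([[1, 2], [3, 4]], true)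

def Spec_get_diagnols (grid : List (List Int)) (bltr : Bool) (out : List (List Int)) : Prop := out = get_diagnols_alt grid bltr
instance (grid : List (List Int)) (bltr : Bool) (out : List (List Int)) : Decidable (Spec_get_diagnols grid bltr out) := by unfold Spec_get_diagnols; infer_instance

-- ===== CLAIM (what is proved, stated in full; the proofs are below) =====
def Claim_equal_get_diagnols : Prop := ∀ (grid : List (List Int)) (bltr : Bool), Dom_get_diagnols grid bltr → Pre_get_diagnols grid bltr → Spec_get_diagnols grid bltr (get_diagnols grid bltr)

-- ===== LEMMAS AND PROOFS =====

theorem pvAppendAt_getElem? (ret : List (List Int)) (i : Int) (v : Int) (d : Nat) :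
    (pvAppendAt ret i v)[d]? = ret[d]?.map (fun b => b ++ (if i = (d : Int) then [v] else [])) := by
  unfold pvAppendAt
  split
  · have : ¬ (i = (d : Int)) := by omega
    simp [this]
  · rw [List.getElem?_modify]
    rcases eq_or_ne i (d : Int) with h | h
    · have : i.toNat = d := by omega
      simp [h, this, Option.map]
    · have : i.toNat ≠ d := by omega
      simp [h, this, Option.map]
      cases ret[d]? <;> simp

theorem foldl_bucket {α : Type} (F : List (List Int) → α → List (List Int))
    (c : α → List Int) (d : Nat)
    (hF : ∀ ret x, (F ret x)[d]? = ret[d]?.map (fun b => b ++ c x)) :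
    ∀ (l : List α) (ret : List (List Int)),
      (l.foldl F ret)[d]? = ret[d]?.map (fun b => b ++ l.flatMap (fun x => c x)) := by
  intro l
  induction l with
  | nil => intro ret; cases h : ret[d]? <;> simp [h]
  | cons x xs ih =>
    intro ret
    rw [List.foldl_cons, ih, hF]
    cases ret[d]? <;> simp

-- one pass of 'for x in range(0, N): if x == c: emit f x' collapses to a single hit
theorem flatMap_range_single (N : Nat) (c : Int) (f : Int → List Int) :
    (PySem.List.pyRange 0 (N : Int) 1).flatMap (fun x => if x = c then f x else []) =
      if 0 ≤ c ∧ c < (N : Int) then f c else [] := by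
  induction N with
  | zero => simp [PySem.List.pyRange_one_eq_nil]
  | succ n ih =>
    have h : ((n : Int) + 1) = ((n + 1 : Nat) : Int) := by push_cast; ring
    rw [show ((n + 1 : Nat) : Int) = (n : Int) + 1 by push_cast; ring,
        PySem.List.pyRange_one_succ_right (by positivity)]
    rw [List.flatMap_append, ih]
    simp only [List.flatMap_cons, List.flatMap_nil, List.append_nil]
    rcases eq_or_ne (n : Int) c with h1 | h1
    · have h2 : ¬ (0 ≤ c ∧ c < (n : Int)) := by omega
      have h3 : 0 ≤ c ∧ c < (n : Int) + 1 := by omega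
      simp [h1, h3]
    · rcases Classical.em (0 ≤ c ∧ c < (n : Int)) with h2 | h2
      · have h3 : 0 ≤ c ∧ c < (n : Int) + 1 := by omega
        simp [h1, h2, h3]
      · have h3 : ¬ (0 ≤ c ∧ c < (n : Int) + 1) := by omega
        simp only [if_neg h2, if_neg h3, if_neg h1, List.append_nil]

theorem flatMap_congr_mem {α β : Type} (l : List α) (f g : α → List β)
    (h : ∀ x ∈ l, f x = g x) : l.flatMap f = l.flatMap g := by
  induction l with
  | nil => rfl
  | cons x xs ih =>
    simp only [List.flatMap_cons, h x (by simp), ih (fun y hy => h y (by simp [hy]))]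

-- per-diagonal content of A's scatter equals B's gather, for each bucket index d
theorem bucket_eq (grid : List (List Int)) (bltr : Bool)
    (hsq : ∀ row ∈ grid, row.length = grid.length) (d : Nat) :
    (PySem.List.pyRange 0 (grid.length : Int) 1).flatMap (fun row =>
      (PySem.List.pyRange 0 (((PySem.List.pyGet? grid row).getD []).length : Int) 1).flatMap (fun col =>
        if bltr then
          (if row + col = (d : Int) then
            [((PySem.List.pyGet? ((PySem.List.pyGet? grid col).getD []) row).getD 0)] else [])
        else
          (if col - row + ((grid.length : Int) - 1) = (d : Int) then
            [((PySem.List.pyGet? ((PySem.List.pyGet? grid row).getD []) col).getD 0)] else []))) =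
    (if bltr then
      (PySem.List.pyRange 0 (grid.length : Int) 1).filterMap (fun r =>
        if 0 ≤ (d : Int) - r ∧ (d : Int) - r < (grid.length : Int) then
          some ((PySem.List.pyGet? ((PySem.List.pyGet? grid ((d : Int) - r)).getD []) r).getD 0)
        else none)
    else
      (PySem.List.pyRange 0 (grid.length : Int) 1).filterMap (fun r =>
        if 0 ≤ r + (d : Int) - ((grid.length : Int) - 1) ∧ r + (d : Int) - ((grid.length : Int) - 1) < (grid.length : Int) then
          some ((PySem.List.pyGet? ((PySem.List.pyGet? grid r).getD []) (r + (d : Int) - ((grid.length : Int) - 1))).getD 0)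
        else none)) := by
  have hlen : ∀ row : Int, 0 ≤ row → row < (grid.length : Int) →
      ((PySem.List.pyGet? grid row).getD []).length = grid.length := by
    intro row h0 h1
    rw [PySem.List.pyGet?_eq_some_getElem grid h0 h1, Option.getD_some]
    exact hsq _ (grid.getElem_mem _)
  cases bltr
  case false =>
    simp only [Bool.false_eq_true, if_false]
    rw [List.filterMap_eq_flatMap_toList]
    apply flatMap_congr_mem
    intro row hrow
    rw [PySem.List.mem_pyRange_one] at hrow
    rw [hlen row hrow.1 hrow.2]
    have hc : ∀ x ∈ PySem.List.pyRange 0 (grid.length : Int) 1,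
        (if x - row + ((grid.length : Int) - 1) = (d : Int) then
          [((PySem.List.pyGet? ((PySem.List.pyGet? grid row).getD []) x).getD 0)] else []) =
        (if x = row + (d : Int) - ((grid.length : Int) - 1) then
          [((PySem.List.pyGet? ((PySem.List.pyGet? grid row).getD []) x).getD 0)] else []) := by
      intro x _
      split_ifs <;> first | rfl | omega
    rw [flatMap_congr_mem _ _ _ hc]
    rw [flatMap_range_single grid.length (row + (d : Int) - ((grid.length : Int) - 1))
        (fun col => [((PySem.List.pyGet? ((PySem.List.pyGet? grid row).getD []) col).getD 0)])]
    split <;> simp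
  case true =>
    simp only [if_true]
    rw [List.filterMap_eq_flatMap_toList]
    apply flatMap_congr_mem
    intro row hrow
    rw [PySem.List.mem_pyRange_one] at hrow
    rw [hlen row hrow.1 hrow.2]
    have hc : ∀ x ∈ PySem.List.pyRange 0 (grid.length : Int) 1,
        (if row + x = (d : Int) then
          [((PySem.List.pyGet? ((PySem.List.pyGet? grid x).getD []) row).getD 0)] else []) =
        (if x = (d : Int) - row then
          [((PySem.List.pyGet? ((PySem.List.pyGet? grid x).getD []) row).getD 0)] else []) := by
      intro x _
      split_ifs <;> first | rfl | omega
    rw [flatMap_congr_mem _ _ _ hc]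
    rw [flatMap_range_single grid.length ((d : Int) - row)
        (fun col => [((PySem.List.pyGet? ((PySem.List.pyGet? grid col).getD []) row).getD 0)])]
    split <;> simp

theorem get_diagnols_spec : Claim_equal_get_diagnols := by
  intro grid bltr _ hpre
  obtain ⟨hne, hsq⟩ := hpre
  unfold Spec_get_diagnols
  simp only [get_diagnols, get_diagnols_alt]
  apply List.ext_getElem?
  intro k
  have hFinner : ∀ (row : Int) (ret : List (List Int)) (col : Int),
      ((if bltr then
          pvAppendAt ret (row + col) ((PySem.List.pyGet? ((PySem.List.pyGet? grid col).getD []) row).getD 0)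
        else
          pvAppendAt ret (col - row + ((grid.length : Int) - 1)) ((PySem.List.pyGet? ((PySem.List.pyGet? grid row).getD []) col).getD 0)))[k]?
      = ret[k]?.map (fun b => b ++
          (if bltr then
            (if row + col = (k : Int) then
              [((PySem.List.pyGet? ((PySem.List.pyGet? grid col).getD []) row).getD 0)] else [])
          else
            (if col - row + ((grid.length : Int) - 1) = (k : Int) then
              [((PySem.List.pyGet? ((PySem.List.pyGet? grid row).getD []) col).getD 0)] else []))) := by
    intro row ret col
    cases bltr <;> simp only [Bool.false_eq_true, if_false, if_true] <;> rw [pvAppendAt_getElem?]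
  have hFOuter : ∀ (ret : List (List Int)) (row : Int),
      ((PySem.List.pyRange 0 (((PySem.List.pyGet? grid row).getD []).length : Int) 1).foldl
        (fun ret col =>
          if bltr then
            pvAppendAt ret (row + col) ((PySem.List.pyGet? ((PySem.List.pyGet? grid col).getD []) row).getD 0)
          else
            pvAppendAt ret (col - row + ((grid.length : Int) - 1)) ((PySem.List.pyGet? ((PySem.List.pyGet? grid row).getD []) col).getD 0)) ret)[k]?
      = ret[k]?.map (fun b => b ++
          (PySem.List.pyRange 0 (((PySem.List.pyGet? grid row).getD []).length : Int) 1).flatMap (fun col =>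
            if bltr then
              (if row + col = (k : Int) then
                [((PySem.List.pyGet? ((PySem.List.pyGet? grid col).getD []) row).getD 0)] else [])
            else
              (if col - row + ((grid.length : Int) - 1) = (k : Int) then
                [((PySem.List.pyGet? ((PySem.List.pyGet? grid row).getD []) col).getD 0)] else []))) := by
    intro ret row
    exact foldl_bucket _
      (fun col =>
        if bltr then
          (if row + col = (k : Int) then
            [((PySem.List.pyGet? ((PySem.List.pyGet? grid col).getD []) row).getD 0)] else [])
        else
          (if col - row + ((grid.length : Int) - 1) = (k : Int) then
            [((PySem.List.pyGet? ((PySem.List.pyGet? grid row).getD []) col).getD 0)] else []))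
      k (hFinner row) _ ret
  rw [foldl_bucket _
      (fun row =>
        (PySem.List.pyRange 0 (((PySem.List.pyGet? grid row).getD []).length : Int) 1).flatMap (fun col =>
          if bltr then
            (if row + col = (k : Int) then
              [((PySem.List.pyGet? ((PySem.List.pyGet? grid col).getD []) row).getD 0)] else [])
          else
            (if col - row + ((grid.length : Int) - 1) = (k : Int) then
              [((PySem.List.pyGet? ((PySem.List.pyGet? grid row).getD []) col).getD 0)] else [])))
      k hFOuter]
  rw [List.getElem?_map, List.getElem?_map, PySem.List.getElem?_pyRange_one]
  by_cases hk : k < (2 * (grid.length : Int) - 1 - 0).toNat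
  · simp only [if_pos hk, Option.map_some, List.nil_append, zero_add, Option.some.injEq]
    exact bucket_eq grid bltr hsq k
  · simp only [if_neg hk, Option.map_none]
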